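-- pv_equiv track=rewrite | github.com/BasilRommens/ICB-BEAM | additional.py | custom_max
-- ===== SOURCE A (Python) =====
-- def custom_max(elements):
--     max_list = set()
--     max_num = 0
--     for element in elements:
--         if element[0][0] > max_num:
--             max_num = element[0][0]
--             max_list.clear()
--             max_list.add(element)
--         if element[0][0] == max_num:
--             max_list.add(element)
--     return max_list
-- ===== SOURCE B (Python) =====
-- def custom_max(elements):
--     elements = list(elements)
--     max_num = 0
--     for e in elements:
--         if e[0][0] > max_num:
--             max_num = e[0][0]
--     return {e for e in elements if e[0][0] == max_num}
-- ===== Notes on version B (the rewrite author's own statement) =====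
-- stated objective: simpler
-- what changed: Replaces the single-pass accumulate-and-clear set maintenance with two plain passes: first compute the zero-floored maximum first-key, then a set comprehension filtering for it.
import Mathlib
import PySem

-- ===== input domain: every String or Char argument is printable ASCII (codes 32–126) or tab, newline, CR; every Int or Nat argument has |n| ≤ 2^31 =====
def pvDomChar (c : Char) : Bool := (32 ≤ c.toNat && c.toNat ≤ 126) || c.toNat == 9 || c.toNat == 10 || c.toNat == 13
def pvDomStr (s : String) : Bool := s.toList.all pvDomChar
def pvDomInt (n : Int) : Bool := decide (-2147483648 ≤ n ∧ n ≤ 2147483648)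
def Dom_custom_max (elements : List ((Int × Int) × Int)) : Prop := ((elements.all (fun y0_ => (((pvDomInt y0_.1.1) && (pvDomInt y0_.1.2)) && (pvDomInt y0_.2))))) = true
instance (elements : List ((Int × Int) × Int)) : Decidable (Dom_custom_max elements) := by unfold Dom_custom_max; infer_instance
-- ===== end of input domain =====

-- B computes the zero-floored maximum first-key in one pass, then filters for it in a second,
-- replacing A's accumulate-and-clear set maintenance (objective: simpler).


-- ===== PORT A =====
-- one loop iteration of A: first branch may raise the max and reset the set, second adds on equality
def customMaxStep (st : List ((Int × Int) × Int) × Int) (e : (Int × Int) × Int) :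
    List ((Int × Int) × Int) × Int :=
  let st1 := if e.1.1 > st.2 then (PySem.Set.add PySem.Set.empty e, e.1.1) else st
  if e.1.1 == st1.2 then (PySem.Set.add st1.1 e, st1.2) else st1

def custom_max (elements : List ((Int × Int) × Int)) : List ((Int × Int) × Int) :=
  (elements.foldl customMaxStep (PySem.Set.empty, 0)).1

-- ===== PORT B =====
def custom_max_alt (elements : List ((Int × Int) × Int)) : List ((Int × Int) × Int) :=
  let max_num := elements.foldl (fun m e => if e.1.1 > m then e.1.1 else m) 0
  PySem.Set.ofList (elements.filter (fun e => e.1.1 == max_num))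

-- ===== PRECONDITION & SPEC =====
def Spec_custom_max (elements : List ((Int × Int) × Int)) (out : List ((Int × Int) × Int)) : Prop := out = custom_max_alt elements
instance (elements : List ((Int × Int) × Int)) (out : List ((Int × Int) × Int)) : Decidable (Spec_custom_max elements out) := by unfold Spec_custom_max; infer_instance

-- ===== CLAIM (what is proved, stated in full; the proofs are below) =====
def Claim_equal_custom_max : Prop := ∀ (elements : List ((Int × Int) × Int)), Dom_custom_max elements → Spec_custom_max elements (custom_max elements)

-- ===== LEMMAS AND PROOFS =====

def cmMax (l : List ((Int × Int) × Int)) : Int :=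
  l.foldl (fun m e => if e.1.1 > m then e.1.1 else m) 0

theorem cmMax_append (l : List ((Int × Int) × Int)) (e : (Int × Int) × Int) :
    cmMax (l ++ [e]) = if e.1.1 > cmMax l then e.1.1 else cmMax l := by
  simp [cmMax, List.foldl_append]

theorem cmMax_le_aux (l : List ((Int × Int) × Int)) (m : Int) :
    m ≤ l.foldl (fun m e => if e.1.1 > m then e.1.1 else m) m ∧
    ∀ x ∈ l, x.1.1 ≤ l.foldl (fun m e => if e.1.1 > m then e.1.1 else m) m := by
  induction l generalizing m with
  | nil => simp
  | cons a t ih =>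
    simp only [List.foldl_cons, List.mem_cons]
    rcases ih (if a.1.1 > m then a.1.1 else m) with ⟨h1, h2⟩
    constructor
    · exact le_trans (by split <;> omega) h1
    · rintro x (rfl | hx)
      · exact le_trans (by split <;> omega) h1
      · exact h2 x hx

theorem mem_le_cmMax (l : List ((Int × Int) × Int)) {x : (Int × Int) × Int} (hx : x ∈ l) :
    x.1.1 ≤ cmMax l := (cmMax_le_aux l 0).2 x hx

theorem ofList_append_singleton {α : Type} [BEq α] (xs : List α) (x : α) :
    PySem.Set.ofList (xs ++ [x]) = PySem.Set.add (PySem.Set.ofList xs) x := by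
  simp [PySem.Set.ofList_eq_foldl, List.foldl_append]

theorem customMax_invariant (l : List ((Int × Int) × Int)) :
    l.foldl customMaxStep (PySem.Set.empty, 0) =
      (PySem.Set.ofList (l.filter (fun e => e.1.1 == cmMax l)), cmMax l) := by
  induction l using List.reverseRecOn with
  | nil => simp [cmMax, PySem.Set.ofList, PySem.Set.empty]
  | append_singleton l e ih =>
    rw [List.foldl_append, ih, cmMax_append]
    simp only [List.foldl_cons, List.foldl_nil, List.filter_append, List.filter_cons,
      List.filter_nil]
    by_cases hgt : e.1.1 > cmMax l
    · have hfl : l.filter (fun x => x.1.1 == e.1.1) = [] := by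
        apply List.filter_eq_nil_iff.mpr
        intro x hx
        have := mem_le_cmMax l hx
        simp only [beq_iff_eq]
        omega
      simp only [customMaxStep, if_pos hgt, hfl]
      simp [PySem.Set.add, PySem.Set.empty, PySem.Set.contains, PySem.Set.ofList]
    · by_cases heq : e.1.1 = cmMax l
      · simp only [customMaxStep, if_neg hgt, if_pos (beq_iff_eq.mpr heq)]
        simp [ofList_append_singleton]
      · simp only [customMaxStep, if_neg hgt, if_neg (show ¬ (e.1.1 == cmMax l) = true by simpa using heq)]
        simp

-- ===== VERDICT (by name: the statement is the Claim_ definition above) =====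
theorem custom_max_spec : Claim_equal_custom_max := by
  intro elements _
  unfold Spec_custom_max custom_max custom_max_alt
  rw [customMax_invariant]
  rfl
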